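-- pv_equiv track=rewrite | github.com/radu-gajdos/IG1 | FP/exam/zp2.py | generiere_matrix
-- ===== SOURCE A (Python) =====
-- def generiere_matrix(n):
--     matrix = [[0] * n for i in range(n)]
--     zahl = n * n
--     for i in range(n-1,-1,-1):
--         for j in range(n):
--             matrix[i][j] = zahl
--             zahl -= 1
--     return matrix
--
-- n=4
-- ===== SOURCE B (Python) =====
-- def generiere_matrix(n):
--     # Closed form: cell (i, j) holds (i+1)*n - j; no running counter, no reverse traversal.
--     return [[(i + 1) * n - j for j in range(n)] for i in range(n)]
-- ===== Notes on version B (the rewrite author's own statement) =====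
-- stated objective: simpler
-- what changed: Replaced the bottom-up reverse traversal with a stateful decrementing counter by a direct closed-form per-cell formula (i+1)*n - j computed independently for each index pair.
import Mathlib
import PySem

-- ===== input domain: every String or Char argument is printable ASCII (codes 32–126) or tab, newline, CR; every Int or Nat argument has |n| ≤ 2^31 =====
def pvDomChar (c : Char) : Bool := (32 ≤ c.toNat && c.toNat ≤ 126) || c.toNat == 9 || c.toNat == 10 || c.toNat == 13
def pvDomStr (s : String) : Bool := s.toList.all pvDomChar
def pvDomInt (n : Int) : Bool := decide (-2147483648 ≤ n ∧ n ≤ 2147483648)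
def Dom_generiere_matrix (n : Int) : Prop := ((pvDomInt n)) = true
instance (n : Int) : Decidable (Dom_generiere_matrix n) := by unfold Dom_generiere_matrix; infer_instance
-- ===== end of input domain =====

-- B replaces A's bottom-up traversal with a stateful decrementing counter by the closed-form
-- per-cell formula (i+1)*n - j, computed independently for each index pair (objective: simpler).


-- ===== PORT A =====
-- '[0] * n' is List.replicate n.toNat 0 (empty for n ≤ 0, exactly as in Python);
-- the loop indices i, j produced by the ranges are nonnegative, so .toNat on them is exact.
def generiere_matrix (n : Int) : List (List Int) :=
  let matrix := (PySem.List.pyRange 0 n 1).map (fun _ => List.replicate n.toNat 0)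
  let res := (PySem.List.pyRange (n-1) (-1) (-1)).foldl
    (fun st i =>
      (PySem.List.pyRange 0 n 1).foldl
        (fun st2 j => (st2.1.modify i.toNat (fun row => row.set j.toNat st2.2), st2.2 - 1)) st)
    (matrix, n * n)
  res.1

-- ===== PORT B =====
def generiere_matrix_alt (n : Int) : List (List Int) :=
  (PySem.List.pyRange 0 n 1).map (fun i => (PySem.List.pyRange 0 n 1).map (fun j => (i+1)*n - j))

-- ===== PRECONDITION & SPEC =====
def Spec_generiere_matrix (n : Int) (out : List (List Int)) : Prop := out = generiere_matrix_alt n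
instance (n : Int) (out : List (List Int)) : Decidable (Spec_generiere_matrix n out) := by unfold Spec_generiere_matrix; infer_instance

-- ===== CLAIM (what is proved, stated in full; the proofs are below) =====
def Claim_equal_generiere_matrix : Prop := ∀ (n : Int), Dom_generiere_matrix n → Spec_generiere_matrix n (generiere_matrix n)

-- ===== LEMMAS AND PROOFS =====

-- the intermediate matrix after A has filled rows k, k+1, …: rows below k still zero, rows ≥ k final
def pvMid (n : Int) (k : Nat) : List (List Int) :=
  (PySem.List.pyRange 0 n 1).map
    (fun i => if i < (k : Int) then List.replicate n.toNat 0
              else (PySem.List.pyRange 0 n 1).map (fun j => (i+1)*n - j))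

lemma pv_modify_eq_set {m : List (List Int)} {k : Nat} {r : List Int}
    (h : m[k]? = some r) (f : List Int → List Int) : m.modify k f = m.set k (f r) := by
  simp [List.modify_eq_set_getElem?, h]

lemma pv_set_self {m : List (List Int)} {k : Nat} {r : List Int}
    (h : m[k]? = some r) : m.set k r = m := by
  apply List.ext_getElem?
  intro j
  rcases eq_or_ne j k with rfl | hne
  · have hk : j < m.length := (List.getElem?_eq_some_iff.mp h).1
    rw [List.getElem?_set_self hk, h]
  · rw [List.getElem?_set_ne (by omega)]

lemma pv_take_set (r : List Int) (a : Nat) (z : Int) (h : a < r.length) :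
    (r.set a z).take (a+1) = r.take a ++ [z] := by
  rw [List.set_eq_take_append_cons_drop, if_pos h, List.take_append]
  simp [List.length_take, Nat.min_eq_left (le_of_lt h)]

-- inner loop: filling row k (of length a + c, first a cells already rewritten) from column a on
lemma pv_inner (n : Int) (c : Nat) : ∀ (a : Nat) (m : List (List Int)) (k : Nat) (z : Int) (r : List Int),
    m[k]? = some r → r.length = a + c → (a : Int) + c = n →
    (PySem.List.pyRange a n 1).foldl
        (fun st2 j => (st2.1.modify k (fun row => row.set j.toNat st2.2), st2.2 - 1)) (m, z)
      = (m.set k (r.take a ++ (List.range c).map (fun t : Nat => z - (t : Int))), z - c) := by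
  induction c with
  | zero =>
    intro a m k z r hm hr hn
    rw [PySem.List.pyRange_one_eq_nil (by omega)]
    simp only [List.foldl_nil, List.range_zero, List.map_nil, List.append_nil,
      Nat.cast_zero, sub_zero]
    rw [List.take_of_length_le (by omega : r.length ≤ a), pv_set_self hm]
  | succ c ih =>
    intro a m k z r hm hr hn
    rw [PySem.List.pyRange_one_cons (by omega : (a : Int) < n)]
    simp only [List.foldl_cons, Int.toNat_natCast]
    rw [pv_modify_eq_set hm]
    have ih' := ih (a+1) (m.set k (r.set a z)) k (z - 1) (r.set a z)
          (List.getElem?_set_self (List.getElem?_eq_some_iff.mp hm).1)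
          (by simp [hr]; omega) (by push_cast; omega)
    rw [show ((a : Int) + 1) = ((a + 1 : Nat) : Int) by push_cast; ring, ih']
    rw [List.set_set]
    have ha : a < r.length := by omega
    have hrow : (r.set a z).take (a+1) ++ (List.range c).map (fun t : Nat => z - 1 - (t : Int))
        = r.take a ++ (List.range (c+1)).map (fun t : Nat => z - (t : Int)) := by
      rw [pv_take_set r a z ha, List.range_succ_eq_map, List.map_cons, List.map_map,
          List.append_assoc, List.singleton_append]
      congr 2
      · norm_num
      · apply List.map_congr_left
        intro x _
        simp only [Function.comp_apply]
        push_cast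
        ring
    rw [hrow, show z - 1 - (c : Int) = z - ((c + 1 : Nat) : Int) by push_cast; ring]

-- outer loop: rows k-1 down to 0, starting from the intermediate matrix pvMid n k
lemma pv_outer (n : Int) (hn : 0 < n) : ∀ (k : Nat), (k : Int) ≤ n →
    (PySem.List.pyRange ((k : Int) - 1) (-1) (-1)).foldl
      (fun st i =>
        (PySem.List.pyRange 0 n 1).foldl
          (fun st2 j => (st2.1.modify i.toNat (fun row => row.set j.toNat st2.2), st2.2 - 1)) st)
      (pvMid n k, (k : Int) * n)
    = (pvMid n 0, 0) := by
  have hnn : ((n.toNat : Int)) = n := Int.toNat_of_nonneg hn.le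
  intro k
  induction k with
  | zero =>
    intro _
    rw [PySem.List.pyRange_neg_one_eq_nil (by omega)]
    simp
  | succ k ih =>
    intro hk
    have hlen : (pvMid n (k+1)).length = n.toNat := by
      simp [pvMid, PySem.List.length_pyRange_one]
    have hklt : k < n.toNat := by omega
    have hm : (pvMid n (k+1))[k]? = some (List.replicate n.toNat 0) := by
      unfold pvMid
      simp only [List.getElem?_map, PySem.List.getElem?_pyRange_one]
      rw [if_pos (by omega : k < (n - 0).toNat)]
      simp only [Option.map_some, zero_add]
      rw [if_pos (by push_cast; omega)]
    have hstep : ((k+1 : Nat) : Int) - 1 = (k : Int) := by push_cast; ring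
    rw [hstep, PySem.List.pyRange_neg_one_cons (by omega : (-1 : Int) < (k : Int))]
    simp only [List.foldl_cons, Int.toNat_natCast]
    have hin := pv_inner n n.toNat 0 (pvMid n (k+1)) k (((k+1 : Nat) : Int) * n)
          (List.replicate n.toNat 0) hm (by simp) (by push_cast [hnn]; ring)
    rw [show (PySem.List.pyRange 0 n 1) = (PySem.List.pyRange ((0:Nat):Int) n 1) from by
          norm_num, hin]
    have hset : (pvMid n (k+1)).set k
        ((List.replicate n.toNat 0).take 0 ++
          (List.range n.toNat).map (fun t : Nat => ((k+1 : Nat) : Int) * n - (t : Int))) = pvMid n k := by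
      apply List.ext_getElem?
      intro t
      rcases eq_or_ne t k with rfl | hne
      · rw [List.getElem?_set_self (by rw [hlen]; omega)]
        unfold pvMid
        simp only [List.getElem?_map, PySem.List.getElem?_pyRange_one]
        rw [if_pos (by omega : t < (n - 0).toNat)]
        simp only [Option.map_some, zero_add, List.take_zero, List.nil_append]
        rw [if_neg (by omega)]
        rw [PySem.List.pyRange_zero, List.map_map]
        congr 1
      · rw [List.getElem?_set_ne (by omega)]
        unfold pvMid
        simp only [List.getElem?_map, PySem.List.getElem?_pyRange_one]
        split_ifs with h
        · simp only [Option.map_some, zero_add]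
          congr 1
          by_cases hlt : (t : Int) < (k : Int)
          · rw [if_pos (by push_cast; omega), if_pos hlt]
          · rw [if_neg (by push_cast; omega), if_neg (by omega)]
        · rfl
    rw [hset, show ((k+1 : Nat) : Int) * n - (n.toNat : Int) = (k : Int) * n
          by rw [hnn]; push_cast; ring]
    exact ih (by omega)

-- ===== VERDICT (by name: the statement is the Claim_ definition above) =====
theorem generiere_matrix_spec : Claim_equal_generiere_matrix := by
  intro n _
  unfold Spec_generiere_matrix
  by_cases hn : n ≤ 0
  · simp [generiere_matrix, generiere_matrix_alt,
      PySem.List.pyRange_neg_one_eq_nil (by omega : n - 1 ≤ -1),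
      PySem.List.pyRange_one_eq_nil (by omega : n ≤ 0)]
  · replace hn : 0 < n := by omega
    have hnn : ((n.toNat : Int)) = n := Int.toNat_of_nonneg hn.le
    have hmat : (PySem.List.pyRange 0 n 1).map (fun _ => List.replicate n.toNat 0)
        = pvMid n n.toNat := by
      unfold pvMid
      apply List.map_congr_left
      intro i hi
      rw [if_pos (by rw [hnn]; exact (PySem.List.mem_pyRange_one.mp hi).2)]
    have h0 : pvMid n 0 = generiere_matrix_alt n := by
      unfold pvMid generiere_matrix_alt
      apply List.map_congr_left
      intro i hi
      rw [if_neg (by push_cast; exact not_lt.mpr (PySem.List.mem_pyRange_one.mp hi).1)]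
    show ((PySem.List.pyRange (n-1) (-1) (-1)).foldl _ (_, n * n)).1 = _
    rw [hmat, show n - 1 = ((n.toNat : Int)) - 1 by rw [hnn],
        show n * n = ((n.toNat : Int)) * n by rw [hnn]]
    rw [pv_outer n hn n.toNat (by omega)]
    exact h0
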